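-- pv_equiv track=rewrite | github.com/elonmasai7/CapSec | capsec/parser.py | _extract_top_level_forms
-- ===== SOURCE A (Python) =====
-- from typing import List
--
-- def _extract_top_level_forms(code: str) -> List[str]:
--     forms: List[str] = []
--     depth = 0
--     start = None
--     in_string = False
--     escape = False
--
--     for idx, ch in enumerate(code):
--         if in_string:
--             if escape:
--                 escape = False
--             elif ch == "\\":
--                 escape = True
--             elif ch == '"':
--                 in_string = False
--             continue
--
--         if ch == '"':
--             in_string = True
--             continue
--
--         if ch == "(":
--             if depth == 0:
--                 start = idx
--             depth += 1
--         elif ch == ")":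
--             if depth > 0:
--                 depth -= 1
--                 if depth == 0 and start is not None:
--                     forms.append(code[start : idx + 1])
--                     start = None
--
--     return forms
-- ===== SOURCE B (Python) =====
-- from typing import List
--
-- def _extract_top_level_forms(code: str) -> List[str]:
--     # Pass 1: one string-machine scan collecting only the active paren events.
--     events = []
--     in_string = False
--     escape = False
--     for idx, ch in enumerate(code):
--         if not in_string and ch in "()":
--             events.append((idx, ch == "("))
--         if in_string:
--             if escape:
--                 escape = False
--             elif ch == "\\":
--                 escape = True
--             elif ch == '"':
--                 in_string = False
--         elif ch == '"':
--             in_string = True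
--     # Pass 2: match parens over the (short) event list only.
--     forms: List[str] = []
--     depth = 0
--     start = 0
--     for idx, is_open in events:
--         if is_open:
--             if depth == 0:
--                 start = idx
--             depth += 1
--         elif depth > 0:
--             depth -= 1
--             if depth == 0:
--                 forms.append(code[start : idx + 1])
--     return forms
-- ===== Notes on version B (the rewrite author's own statement) =====
-- stated objective: alternative
-- what changed: Replaced the single interleaved string+paren state machine by two passes: one scan that filters out just the active paren events (index, open/close) using the string/escape machine, then a paren-matching scan over that short event list alone; depth tracking no longer touches non-paren characters.
import Mathlib
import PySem

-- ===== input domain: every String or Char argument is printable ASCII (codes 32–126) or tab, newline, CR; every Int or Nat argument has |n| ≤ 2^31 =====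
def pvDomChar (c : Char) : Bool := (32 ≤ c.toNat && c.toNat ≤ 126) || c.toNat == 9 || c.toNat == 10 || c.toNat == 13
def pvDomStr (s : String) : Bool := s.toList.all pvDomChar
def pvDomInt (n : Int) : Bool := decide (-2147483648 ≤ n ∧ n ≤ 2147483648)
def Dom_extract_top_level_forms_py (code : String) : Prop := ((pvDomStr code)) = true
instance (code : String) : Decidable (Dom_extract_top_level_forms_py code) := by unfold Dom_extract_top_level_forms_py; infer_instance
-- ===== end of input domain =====

-- B replaces A's single interleaved string+paren state machine by two passes (collect active
-- paren events, then match parens over that event list only); alternative decomposition, same cost.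

-- ===== PORT A =====
-- A's loop state: (forms, depth, start, in_string, escape)
def pvAstep (code : String) (st : List String × Int × Option Int × Bool × Bool)
    (p : Int × Char) : List String × Int × Option Int × Bool × Bool :=
  match st, p with
  | (forms, depth, start, instr, esc), (idx, ch) =>
    if instr then
      if esc then (forms, depth, start, instr, false)
      else if ch = '\\' then (forms, depth, start, instr, true)
      else if ch = '"' then (forms, depth, start, false, esc)
      else (forms, depth, start, instr, esc)
    else if ch = '"' then (forms, depth, start, true, esc)
    else if ch = '(' then
      (forms, depth + 1, (if depth = 0 then some idx else start), instr, esc)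
    else if ch = ')' then
      if depth > 0 then
        if depth - 1 = 0 then
          match start with
          | some s =>
              (forms ++ [PySem.Str.slice code (some s) (some (idx + 1))], depth - 1, none, instr, esc)
          | none => (forms, depth - 1, none, instr, esc)
        else (forms, depth - 1, start, instr, esc)
      else (forms, depth, start, instr, esc)
    else (forms, depth, start, instr, esc)

def extract_top_level_forms_py (code : String) : List String :=
  ((PySem.List.enumerate code.toList).foldl (pvAstep code) ([], 0, none, false, false)).1

-- ===== PORT B =====
-- B pass 1 state: (events, in_string, escape); an event is (index, is_open)
def pvBev (st : List (Int × Bool) × Bool × Bool) (p : Int × Char) :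
    List (Int × Bool) × Bool × Bool :=
  match st, p with
  | (events, instr, esc), (idx, ch) =>
    let events := if instr = false ∧ (ch = '(' ∨ ch = ')') then events ++ [(idx, ch == '(')] else events
    if instr then
      if esc then (events, instr, false)
      else if ch = '\\' then (events, instr, true)
      else if ch = '"' then (events, false, esc)
      else (events, instr, esc)
    else if ch = '"' then (events, true, esc)
    else (events, instr, esc)

-- B pass 2 state: (forms, depth, start)
def pvBmatch (code : String) (st : List String × Int × Int) (e : Int × Bool) :
    List String × Int × Int :=
  match st, e with
  | (forms, depth, start), (idx, isOpen) =>
    if isOpen then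
      (forms, depth + 1, if depth = 0 then idx else start)
    else if depth > 0 then
      if depth - 1 = 0 then
        (forms ++ [PySem.Str.slice code (some start) (some (idx + 1))], depth - 1, start)
      else (forms, depth - 1, start)
    else (forms, depth, start)

def extract_top_level_forms_py_alt (code : String) : List String :=
  let events := ((PySem.List.enumerate code.toList).foldl pvBev ([], false, false)).1
  (events.foldl (pvBmatch code) ([], 0, 0)).1

-- ===== PRECONDITION & SPEC =====
def Spec_extract_top_level_forms_py (code : String) (out : List String) : Prop := out = extract_top_level_forms_py_alt code
instance (code : String) (out : List String) : Decidable (Spec_extract_top_level_forms_py code out) := by unfold Spec_extract_top_level_forms_py; infer_instance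

-- ===== CLAIM (what is proved, stated in full; the proofs are below) =====
def Claim_equal_extract_top_level_forms_py : Prop := ∀ (code : String), Dom_extract_top_level_forms_py code → Spec_extract_top_level_forms_py code (extract_top_level_forms_py code)

-- ===== LEMMAS AND PROOFS =====

-- one pvBev step only appends to the event accumulator; the string state ignores it
theorem pvBev_acc_step (es : List (Int × Bool)) (i e : Bool) (p : Int × Char) :
    pvBev (es, i, e) p = (es ++ (pvBev ([], i, e) p).1, (pvBev ([], i, e) p).2) := by
  obtain ⟨idx, ch⟩ := p
  simp only [pvBev]
  split_ifs <;> simp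

-- the whole first pass: events accumulate on the right, string state is accumulator-independent
theorem pvBev_acc (l : List (Int × Char)) : ∀ (es : List (Int × Bool)) (i e : Bool),
    l.foldl pvBev (es, i, e)
      = (es ++ (l.foldl pvBev ([], i, e)).1, (l.foldl pvBev ([], i, e)).2) := by
  induction l with
  | nil => intro es i e; simp
  | cons p l ih =>
    intro es i e
    simp only [List.foldl_cons]
    rcases hd : pvBev ([], i, e) p with ⟨d1, i', e'⟩
    rw [pvBev_acc_step, hd]
    simp only
    rw [ih (es ++ d1) i' e', ih d1 i' e']
    simp

-- unfold one step of the first pass on the event component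
theorem pvBev_events_cons (p : Int × Char) (l : List (Int × Char)) (i e : Bool) :
    ((p :: l).foldl pvBev ([], i, e)).1
      = (pvBev ([], i, e) p).1
        ++ (l.foldl pvBev ([], (pvBev ([], i, e) p).2.1, (pvBev ([], i, e) p).2.2)).1 := by
  simp only [List.foldl_cons]
  rcases h : pvBev ([], i, e) p with ⟨d1, i', e'⟩
  rw [pvBev_acc l d1 i' e']

-- main invariant: A's interleaved fold equals B's match-fold over B's event list,
-- for any common (forms, depth) and related start values
theorem pvMain (code : String) (cs : List Char) :
    ∀ (idx : Int) (instr esc : Bool) (forms : List String) (depth : Int)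
      (sA : Option Int) (sB : Int),
      0 ≤ depth → (depth = 0 → sA = none) → (depth ≠ 0 → sA = some sB) →
      ((PySem.List.enumerate cs idx).foldl (pvAstep code) (forms, depth, sA, instr, esc)).1
        = ((((PySem.List.enumerate cs idx).foldl pvBev ([], instr, esc)).1).foldl
            (pvBmatch code) (forms, depth, sB)).1 := by
  induction cs with
  | nil => intro idx instr esc forms depth sA sB _ _ _; simp [PySem.List.enumerate_nil]
  | cons c cs ih =>
    intro idx instr esc forms depth sA sB hdep h0 hn
    rw [PySem.List.enumerate_cons, pvBev_events_cons]
    simp only [List.foldl_cons]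
    by_cases hi : instr = true
    · subst hi
      by_cases he : esc = true
      · subst he
        have hA : pvAstep code (forms, depth, sA, true, true) (idx, c)
            = (forms, depth, sA, true, false) := by simp [pvAstep]
        have hE : pvBev ([], true, true) (idx, c) = ([], true, false) := by simp [pvBev]
        rw [hA, hE]
        exact ih _ _ _ _ _ _ _ hdep h0 hn
      · simp only [Bool.not_eq_true] at he; subst he
        by_cases hb : c = '\\'
        · have hA : pvAstep code (forms, depth, sA, true, false) (idx, c)
              = (forms, depth, sA, true, true) := by simp [pvAstep, hb]
          have hE : pvBev ([], true, false) (idx, c) = ([], true, true) := by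
            simp [pvBev, hb]
          rw [hA, hE]
          exact ih _ _ _ _ _ _ _ hdep h0 hn
        · by_cases hq : c = '"'
          · have hA : pvAstep code (forms, depth, sA, true, false) (idx, c)
                = (forms, depth, sA, false, false) := by simp [pvAstep, hq]
            have hE : pvBev ([], true, false) (idx, c) = ([], false, false) := by
              simp [pvBev, hq]
            rw [hA, hE]
            exact ih _ _ _ _ _ _ _ hdep h0 hn
          · have hA : pvAstep code (forms, depth, sA, true, false) (idx, c)
                = (forms, depth, sA, true, false) := by simp [pvAstep, hb, hq]
            have hE : pvBev ([], true, false) (idx, c) = ([], true, false) := by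
              simp [pvBev, hb, hq]
            rw [hA, hE]
            exact ih _ _ _ _ _ _ _ hdep h0 hn
    · simp only [Bool.not_eq_true] at hi; subst hi
      by_cases hq : c = '"'
      · have hA : pvAstep code (forms, depth, sA, false, esc) (idx, c)
            = (forms, depth, sA, true, esc) := by simp [pvAstep, hq]
        have hE : pvBev ([], false, esc) (idx, c) = ([], true, esc) := by simp [pvBev, hq]
        rw [hA, hE]
        exact ih _ _ _ _ _ _ _ hdep h0 hn
      · by_cases hop : c = '('
        · have hE : pvBev ([], false, esc) (idx, c) = ([(idx, true)], false, esc) := by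
            simp [pvBev, hop]
          rw [hE]
          by_cases hz : depth = 0
          · have hA : pvAstep code (forms, depth, sA, false, esc) (idx, c)
                = (forms, depth + 1, some idx, false, esc) := by
              simp [pvAstep, hop, hz]
            have hB : pvBmatch code (forms, depth, sB) (idx, true)
                = (forms, depth + 1, idx) := by simp [pvBmatch, hz]
            rw [hA]
            simp only [List.singleton_append, List.foldl_cons, hB]
            exact ih _ _ _ _ _ _ _ (by omega) (by omega) (fun _ => rfl)
          · have hA : pvAstep code (forms, depth, sA, false, esc) (idx, c)
                = (forms, depth + 1, sA, false, esc) := by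
              simp [pvAstep, hop, hz]
            have hB : pvBmatch code (forms, depth, sB) (idx, true)
                = (forms, depth + 1, sB) := by simp [pvBmatch, hz]
            rw [hA]
            simp only [List.singleton_append, List.foldl_cons, hB]
            exact ih _ _ _ _ _ _ _ (by omega) (by omega) (fun _ => hn hz)
        · by_cases hcl : c = ')'
          · have hE : pvBev ([], false, esc) (idx, c) = ([(idx, false)], false, esc) := by
              simp [pvBev, hcl]
            rw [hE]
            by_cases hpos : depth > 0
            · by_cases hone : depth - 1 = 0
              · have hs : sA = some sB := hn (by omega)
                subst hs
                have hA : pvAstep code (forms, depth, some sB, false, esc) (idx, c)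
                    = (forms ++ [PySem.Str.slice code (some sB) (some (idx + 1))],
                       depth - 1, none, false, esc) := by
                  simp [pvAstep, hcl, hpos, hone]
                have hB : pvBmatch code (forms, depth, sB) (idx, false)
                    = (forms ++ [PySem.Str.slice code (some sB) (some (idx + 1))],
                       depth - 1, sB) := by simp [pvBmatch, hpos, hone]
                rw [hA]
                simp only [List.singleton_append, List.foldl_cons, hB]
                exact ih _ _ _ _ _ _ _ (by omega) (fun _ => rfl) (by omega)
              · have hA : pvAstep code (forms, depth, sA, false, esc) (idx, c)
                    = (forms, depth - 1, sA, false, esc) := by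
                  simp [pvAstep, hcl, hpos, hone]
                have hB : pvBmatch code (forms, depth, sB) (idx, false)
                    = (forms, depth - 1, sB) := by simp [pvBmatch, hpos, hone]
                rw [hA]
                simp only [List.singleton_append, List.foldl_cons, hB]
                exact ih _ _ _ _ _ _ _ (by omega) (by omega) (fun _ => hn (by omega))
            · have hA : pvAstep code (forms, depth, sA, false, esc) (idx, c)
                  = (forms, depth, sA, false, esc) := by
                simp [pvAstep, hcl, hpos]
              have hB : pvBmatch code (forms, depth, sB) (idx, false)
                  = (forms, depth, sB) := by simp [pvBmatch, hpos]
              rw [hA]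
              simp only [List.singleton_append, List.foldl_cons, hB]
              exact ih _ _ _ _ _ _ _ hdep h0 hn
          · have hA : pvAstep code (forms, depth, sA, false, esc) (idx, c)
                = (forms, depth, sA, false, esc) := by simp [pvAstep, hq, hop, hcl]
            have hE : pvBev ([], false, esc) (idx, c) = ([], false, esc) := by
              simp [pvBev, hq, hop, hcl]
            rw [hA, hE]
            exact ih _ _ _ _ _ _ _ hdep h0 hn

-- ===== VERDICT (by name: the statement is the Claim_ definition above) =====
theorem extract_top_level_forms_py_spec : Claim_equal_extract_top_level_forms_py := by
  intro code _
  unfold Spec_extract_top_level_forms_py extract_top_level_forms_py extract_top_level_forms_py_alt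
  exact pvMain code code.toList 0 false false [] 0 none 0 le_rfl (fun _ => rfl) (by omega)
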